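-- pv_equiv track=rewrite | github.com/MrBrantCode/unitest_baseline | mut_generate/mist_train_cf/cf_97408/solution.py | doubleAndFilterPrimes
-- ===== SOURCE A (Python) =====
-- import math
--
-- def doubleAndFilterPrimes(nums):
--     result = []
--
--     for num in nums:
--         if num >= 0:
--             doubled_num = num * 2
--             is_prime = True
--
--             if doubled_num <= 1:
--                 is_prime = False
--             else:
--                 for i in range(2, int(math.sqrt(doubled_num)) + 1):
--                     if doubled_num % i == 0:
--                         is_prime = False
--                         break
--
--             if is_prime:
--                 result.append(doubled_num)
--
--     return result
-- ===== SOURCE B (Python) =====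
-- def doubleAndFilterPrimes(nums):
--     # 2*num is even, and the only even prime is 2, so a doubled value survives iff num == 1.
--     return [2 for num in nums if num == 1]
-- ===== Notes on version B (the rewrite author's own statement) =====
-- stated objective: simpler
-- what changed: Replaces the per-element trial-division primality test of 2*num by the observation that 2*num is even, hence prime only when it equals 2 (num == 1), turning the whole function into one linear comprehension.
import Mathlib
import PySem

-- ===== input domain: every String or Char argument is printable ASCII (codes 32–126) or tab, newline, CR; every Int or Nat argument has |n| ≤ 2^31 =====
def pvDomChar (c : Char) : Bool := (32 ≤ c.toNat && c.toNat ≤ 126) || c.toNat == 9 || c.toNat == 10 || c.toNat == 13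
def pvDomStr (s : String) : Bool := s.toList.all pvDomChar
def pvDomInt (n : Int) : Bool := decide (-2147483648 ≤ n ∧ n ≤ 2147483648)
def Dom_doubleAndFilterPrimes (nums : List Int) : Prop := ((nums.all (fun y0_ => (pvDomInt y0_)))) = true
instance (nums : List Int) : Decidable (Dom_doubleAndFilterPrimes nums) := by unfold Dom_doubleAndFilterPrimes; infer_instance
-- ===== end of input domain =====

-- B replaces A's per-element trial-division primality test by the fact that 2*num is even,
-- hence prime only when num == 1; objective: simpler (one linear comprehension).


-- ===== PORT A =====
-- inner 'for i in range(...): if doubled % i == 0: is_prime = False; break'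
def pvTrialLoop (doubled : Int) : List Int → Bool
  | [] => true
  | i :: rest => if PySem.Int.mod doubled i == 0 then false else pvTrialLoop doubled rest

-- int(math.sqrt(doubled)) is ported as Nat.sqrt; exact on all inputs that matter here
-- (doubled is even, so the loop decides at i = 2; and for doubled ≤ 3 both ranges are empty).
def doubleAndFilterPrimes (nums : List Int) : List Int :=
  nums.foldl (fun result num =>
    if num ≥ 0 then
      let doubled := num * 2
      let is_prime :=
        if doubled ≤ 1 then false
        else pvTrialLoop doubled (PySem.List.pyRange 2 ((Nat.sqrt doubled.toNat : Int) + 1) 1)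
      if is_prime then result ++ [doubled] else result
    else result) []

-- ===== PORT B =====
def doubleAndFilterPrimes_alt (nums : List Int) : List Int :=
  nums.filterMap (fun num => if num == 1 then some 2 else none)

-- ===== PRECONDITION & SPEC =====
def Spec_doubleAndFilterPrimes (nums : List Int) (out : List Int) : Prop := out = doubleAndFilterPrimes_alt nums
instance (nums : List Int) (out : List Int) : Decidable (Spec_doubleAndFilterPrimes nums out) := by unfold Spec_doubleAndFilterPrimes; infer_instance

-- ===== CLAIM (what is proved, stated in full; the proofs are below) =====
def Claim_equal_doubleAndFilterPrimes : Prop := ∀ (nums : List Int), Dom_doubleAndFilterPrimes nums → Spec_doubleAndFilterPrimes nums (doubleAndFilterPrimes nums)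

-- ===== LEMMAS AND PROOFS =====

-- A's per-element step appends [2] exactly when num = 1, else appends nothing.
lemma pvStep_eq (num : Int) (result : List Int) :
    (if num ≥ 0 then
      let doubled := num * 2
      let is_prime :=
        if doubled ≤ 1 then false
        else pvTrialLoop doubled (PySem.List.pyRange 2 ((Nat.sqrt doubled.toNat : Int) + 1) 1)
      if is_prime then result ++ [doubled] else result
    else result)
    = result ++ (if num == 1 then [2] else []) := by
  rcases lt_trichotomy num 1 with h | h | h
  · -- num < 1: either negative (skipped) or num = 0 (doubled ≤ 1)
    by_cases h0 : num ≥ 0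
    · have : num = 0 := by omega
      subst this; simp
    · simp [h0]; omega
  · -- num = 1: doubled = 2, Nat.sqrt 2 = 1, range(2,2) empty
    subst h; norm_num [pvTrialLoop]
    have h2 : Nat.sqrt (Int.toNat 2) = 1 := by
      have a : 1 ≤ Nat.sqrt 2 := Nat.le_sqrt.mpr (by norm_num)
      have b : Nat.sqrt 2 < 2 := Nat.sqrt_lt'.mpr (by norm_num)
      simp only [show Int.toNat 2 = 2 from rfl]; omega
    rw [show ((Nat.sqrt (Int.toNat 2) : Int) + 1) = 2 by rw [h2]; norm_num,
        PySem.List.pyRange_one_eq_nil (by omega)]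
    simp [pvTrialLoop]
  · -- num ≥ 2: doubled = 2*num ≥ 4 even, 2 is in the range and divides it
    have hge : num ≥ 0 := by omega
    have h1 : ¬ (num * 2 ≤ 1) := by omega
    have hne : ¬ (num == 1) = true := by simp; omega
    have hsqrt : 2 ≤ Nat.sqrt (num * 2).toNat := by
      have h4 : 4 ≤ (num * 2).toNat := by omega
      calc 2 ≤ Nat.sqrt 4 := Nat.le_sqrt.mpr (by norm_num)
        _ ≤ Nat.sqrt (num * 2).toNat := Nat.sqrt_le_sqrt h4
    have hlt : (2 : Int) < (Nat.sqrt (num * 2).toNat : Int) + 1 := by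
      have := hsqrt; omega
    have hmod : PySem.Int.mod (num * 2) 2 = 0 := by
      simp [PySem.Int.mod]
    rw [if_pos hge]
    simp only []
    rw [if_neg h1, PySem.List.pyRange_one_cons hlt]
    simp [pvTrialLoop, hne]

lemma pvFoldl_eq (nums : List Int) (acc : List Int) :
    nums.foldl (fun result num =>
      if num ≥ 0 then
        let doubled := num * 2
        let is_prime :=
          if doubled ≤ 1 then false
          else pvTrialLoop doubled (PySem.List.pyRange 2 ((Nat.sqrt doubled.toNat : Int) + 1) 1)
        if is_prime then result ++ [doubled] else result
      else result) acc
    = acc ++ doubleAndFilterPrimes_alt nums := by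
  induction nums generalizing acc with
  | nil => simp [doubleAndFilterPrimes_alt]
  | cons x xs ih =>
    simp only [List.foldl_cons]
    rw [show (if x ≥ 0 then
        let doubled := x * 2
        let is_prime :=
          if doubled ≤ 1 then false
          else pvTrialLoop doubled (PySem.List.pyRange 2 ((Nat.sqrt doubled.toNat : Int) + 1) 1)
        if is_prime then acc ++ [doubled] else acc
      else acc) = acc ++ (if x == 1 then [2] else []) from pvStep_eq x acc]
    rw [ih]
    by_cases hx : x = 1 <;>
      simp [doubleAndFilterPrimes_alt, hx]

-- ===== VERDICT (by name: the statement is the Claim_ definition above) =====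
theorem doubleAndFilterPrimes_spec : Claim_equal_doubleAndFilterPrimes := by
  intro nums _
  show doubleAndFilterPrimes nums = doubleAndFilterPrimes_alt nums
  unfold doubleAndFilterPrimes
  simpa using pvFoldl_eq nums []
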